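-- pv_equiv track=rewrite | github.com/nidhi-shree/team_face_recognition | app.py | transform_box_to_original
-- ===== SOURCE A (Python) =====
-- def transform_box_to_original(box, angle, orig_w, orig_h):
--     """
--     Convert MTCNN box from rotated-image space back to original-image space.
--     PIL.rotate(90)  = CCW 90  → rotated size: (orig_h, orig_w) i.e. new_W=orig_H, new_H=orig_W
--     PIL.rotate(270) = CW  90  → rotated size: (orig_h, orig_w)
--     PIL.rotate(180)           → rotated size: (orig_w, orig_h)
--
--     For a top-left corner point (px, py) in rotated space:
--       rotate(90)  CCW: orig_px = orig_w - py - h,  orig_py = px          (w,h swap)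
--       rotate(270) CW:  orig_px = py,               orig_py = orig_h - px - w  (w,h swap)
--       rotate(180):     orig_px = orig_w - px - w,  orig_py = orig_h - py - h
--     """
--     x, y, w, h = [int(v) for v in box]
--     if angle == 0:
--         return [x, y, w, h]
--     elif angle == 90:   # PIL CCW 90 — rotated dims are (orig_h wide, orig_w tall)
--         return [orig_w - y - h, x, h, w]
--     elif angle == 270:  # PIL CW  90 — rotated dims are (orig_h wide, orig_w tall)
--         return [y, orig_h - x - w, h, w]
--     elif angle == 180:
--         return [orig_w - x - w, orig_h - y - h, w, h]
--     return [x, y, w, h]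
-- ===== SOURCE B (Python) =====
-- def transform_box_to_original(box, angle, orig_w, orig_h):
--     x, y, w, h = [int(v) for v in box]
--     steps = {90: 1, 180: 2, 270: 3}.get(angle, 0)
--     # width of the source image of the i-th undone rotation alternates, ending at orig_w
--     cur, other = (orig_w, orig_h) if steps % 2 == 1 else (orig_h, orig_w)
--     for _ in range(steps):
--         x, y, w, h = cur - y - h, x, h, w
--         cur, other = other, cur
--     return [x, y, w, h]
-- ===== Notes on version B (the rewrite author's own statement) =====
-- stated objective: alternative
-- what changed: Replaced A's four-branch formula table with a single 'undo one CCW-90 rotation' primitive applied 0/1/2/3 times (with alternating image width), so 180 and 270 are compositions of the 90 case rather than separate formulas.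
-- outside the precondition, e.g. on transform_box_to_original([1, 2, 3], 90, 10, 10): A raises ValueError, B raises ValueError
import Mathlib
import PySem

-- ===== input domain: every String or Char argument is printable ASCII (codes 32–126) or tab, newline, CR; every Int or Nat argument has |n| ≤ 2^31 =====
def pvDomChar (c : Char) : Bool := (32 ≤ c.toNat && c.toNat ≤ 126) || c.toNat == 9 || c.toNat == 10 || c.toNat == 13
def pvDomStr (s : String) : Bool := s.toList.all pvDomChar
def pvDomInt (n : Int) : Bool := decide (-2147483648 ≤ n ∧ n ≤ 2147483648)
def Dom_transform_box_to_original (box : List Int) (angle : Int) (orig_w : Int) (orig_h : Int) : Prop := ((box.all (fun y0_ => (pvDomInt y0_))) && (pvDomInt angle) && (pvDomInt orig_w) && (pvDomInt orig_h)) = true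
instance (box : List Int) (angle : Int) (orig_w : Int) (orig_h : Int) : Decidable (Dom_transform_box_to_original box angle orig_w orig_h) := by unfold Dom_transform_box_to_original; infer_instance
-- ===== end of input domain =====

-- B replaces A's four-branch formula table by one undo-90 primitive iterated 0-3 times; equal on all 4-element boxes.


-- ===== PORT A =====
def transform_box_to_original (box : List Int) (angle : Int) (orig_w : Int) (orig_h : Int) : List Int :=
  match box with
  | [x, y, w, h] =>
    if angle = 0 then [x, y, w, h]
    else if angle = 90 then [orig_w - y - h, x, h, w]
    else if angle = 270 then [y, orig_h - x - w, h, w]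
    else if angle = 180 then [orig_w - x - w, orig_h - y - h, w, h]
    else [x, y, w, h]
  | _ => []  -- Python raises ValueError here (unpacking); excluded by Pre_

-- ===== PORT B =====
-- one step of undoing a CCW-90 rotation; `cur` is the width of that step's source image
def tbo_undo : Nat → Int → Int → (Int × Int × Int × Int) → (Int × Int × Int × Int)
  | 0, _, _, s => s
  | n + 1, cur, other, (x, y, w, h) => tbo_undo n other cur (cur - y - h, x, h, w)

def transform_box_to_original_alt (box : List Int) (angle : Int) (orig_w : Int) (orig_h : Int) : List Int :=
  if box.length = 4 then
    let x := box.getD 0 0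
    let y := box.getD 1 0
    let w := box.getD 2 0
    let h := box.getD 3 0
    let steps : Nat := if angle = 90 then 1 else if angle = 180 then 2 else if angle = 270 then 3 else 0
    let p := if steps % 2 = 1 then (orig_w, orig_h) else (orig_h, orig_w)
    let r := tbo_undo steps p.1 p.2 (x, y, w, h)
    [r.1, r.2.1, r.2.2.1, r.2.2.2]
  else []  -- Python raises ValueError unpacking here; excluded by Pre_

-- ===== PRECONDITION & SPEC =====
-- Python A raises ValueError unpacking unless box has exactly 4 elements.
def Pre_transform_box_to_original (box : List Int) (angle : Int) (orig_w : Int) (orig_h : Int) : Prop := box.length = 4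
instance (box : List Int) (angle : Int) (orig_w : Int) (orig_h : Int) : Decidable (Pre_transform_box_to_original box angle orig_w orig_h) := by unfold Pre_transform_box_to_original; infer_instance
def pvWitness_transform_box_to_original : List Int × Int × Int × Int := ([1, 2, 3, 4], 90, 20, 30)

def Spec_transform_box_to_original (box : List Int) (angle : Int) (orig_w : Int) (orig_h : Int) (out : List Int) : Prop := out = transform_box_to_original_alt box angle orig_w orig_h
instance (box : List Int) (angle : Int) (orig_w : Int) (orig_h : Int) (out : List Int) : Decidable (Spec_transform_box_to_original box angle orig_w orig_h out) := by unfold Spec_transform_box_to_original; infer_instance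

-- ===== CLAIM (what is proved, stated in full; the proofs are below) =====
def Claim_equal_transform_box_to_original : Prop := ∀ (box : List Int) (angle : Int) (orig_w : Int) (orig_h : Int), Dom_transform_box_to_original box angle orig_w orig_h → Pre_transform_box_to_original box angle orig_w orig_h → Spec_transform_box_to_original box angle orig_w orig_h (transform_box_to_original box angle orig_w orig_h)

-- ===== LEMMAS AND PROOFS =====

-- ===== VERDICT (by name: the statement is the Claim_ definition above) =====
theorem transform_box_to_original_spec : Claim_equal_transform_box_to_original := by
  intro box angle orig_w orig_h _ hpre
  match box, hpre with
  | [x, y, w, h], _ =>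
    unfold Spec_transform_box_to_original transform_box_to_original transform_box_to_original_alt
    by_cases h0 : angle = 0 <;> by_cases h90 : angle = 90 <;> by_cases h180 : angle = 180 <;>
      by_cases h270 : angle = 270 <;>
      simp_all [tbo_undo] <;> omega
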